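-- pv_equiv track=rewrite | github.com/srinath7788ekbote/sherlock | core/intelligence.py | _infer_naming_pattern
-- ===== SOURCE A (Python) =====
-- def _infer_naming_pattern(names: list[str]) -> str:
--     """Infer a naming convention pattern from a list of names.
--
--     Args:
--         names: List of entity names.
--
--     Returns:
--         Human-readable description of the naming pattern detected.
--     """
--     if not names:
--         return "unknown"
--
--     patterns: list[str] = []
--
--     # Check for common separators.
--     dash_count = sum(1 for n in names if "-" in n)
--     underscore_count = sum(1 for n in names if "_" in n)
--     dot_count = sum(1 for n in names if "." in n)
--
--     total = len(names)
--     if dash_count > total * 0.5: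
--         patterns.append("kebab-case")
--     if underscore_count > total * 0.5:
--         patterns.append("snake_case")
--     if dot_count > total * 0.5:
--         patterns.append("dot.separated")
--
--     # Check for environment suffixes.
--     env_suffixes = ["-prod", "-staging", "-dev", "-qa", "-uat", "-test"]
--     env_count = sum(1 for n in names if any(n.lower().endswith(s) for s in env_suffixes))
--     if env_count > total * 0.3:
--         patterns.append("env-suffixed")
--
--     # Check for common prefixes.
--     if len(names) >= 2:
--         prefix = _common_prefix(names)
--         if len(prefix) >= 3:
--             patterns.append(f"prefix: '{prefix}'")
--
--     return ", ".join(patterns) if patterns else "mixed"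
--
-- def _common_prefix(names: list[str]) -> str:
--     """Find the common prefix among a list of names.
--
--     Args:
--         names: List of strings.
--
--     Returns:
--         The longest common prefix.
--     """
--     if not names:
--         return ""
--     prefix = names[0]
--     for name in names[1:]:
--         while not name.startswith(prefix):
--             prefix = prefix[:-1]
--             if not prefix:
--                 return ""
--     return prefix
-- ===== SOURCE B (Python) =====
-- def _infer_naming_pattern(names: list[str]) -> str:
--     if not names:
--         return "unknown"
--
--     env_suffixes = ("-prod", "-staging", "-dev", "-qa", "-uat", "-test")
--     dash = underscore = dot = env = 0
--     # all separator/env counts in one pass over the names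
--     for n in names:
--         if "-" in n:
--             dash += 1
--         if "_" in n:
--             underscore += 1
--         if "." in n:
--             dot += 1
--         if n.lower().endswith(env_suffixes):
--             env += 1
--
--     total = len(names)
--     patterns: list[str] = []
--     if 2 * dash > total:
--         patterns.append("kebab-case")
--     if 2 * underscore > total:
--         patterns.append("snake_case")
--     if 2 * dot > total:
--         patterns.append("dot.separated")
--     if 10 * env > 3 * total:
--         patterns.append("env-suffixed")
--
--     if total >= 2:
--         # common prefix by character columns: stop at first mismatching column
--         prefix_chars = []
--         for column in zip(*names):
--             c = column[0]
--             if all(ch == c for ch in column[1:]):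
--                 prefix_chars.append(c)
--             else:
--                 break
--         if len(prefix_chars) >= 3:
--             patterns.append("prefix: '%s'" % "".join(prefix_chars))
--
--     return ", ".join(patterns) if patterns else "mixed"
-- ===== Notes on version B (the rewrite author's own statement) =====
-- stated objective: alternative
-- what changed: All four separator/env counts are computed in a single fused pass over the names instead of four separate generator sums, and the common prefix is found by advancing character columns (zip(*names)) instead of repeatedly chopping the last character off names[0] until each name starts with it.
import Mathlib
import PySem

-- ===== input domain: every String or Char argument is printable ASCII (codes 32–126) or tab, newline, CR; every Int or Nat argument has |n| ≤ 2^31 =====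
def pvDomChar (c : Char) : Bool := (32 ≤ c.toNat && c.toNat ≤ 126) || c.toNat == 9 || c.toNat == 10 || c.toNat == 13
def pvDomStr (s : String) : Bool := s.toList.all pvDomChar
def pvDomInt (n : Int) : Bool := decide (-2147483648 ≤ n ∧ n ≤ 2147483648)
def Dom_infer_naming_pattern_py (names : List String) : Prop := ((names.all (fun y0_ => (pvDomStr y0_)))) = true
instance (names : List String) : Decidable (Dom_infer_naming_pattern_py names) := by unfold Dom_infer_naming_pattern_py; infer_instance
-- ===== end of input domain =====

-- B fuses the three separator counts and the env count into one pass over the names and finds the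
-- common prefix by advancing character columns instead of shrinking names[0]; objective: alternative.


-- ===== PORT A =====
def pvEnvSuffixes : List String := ["-prod", "-staging", "-dev", "-qa", "-uat", "-test"]

-- A's inner while-loop: drop the last char of `p` until `name` starts with it
def pvShrinkA (p name : List Char) : List Char :=
  if h : PySem.Chars.startswith name p = true then p
  else
    if h2 : p.dropLast = [] then []
    else pvShrinkA p.dropLast name
termination_by p.length
decreasing_by
  have hp : p ≠ [] := by
    intro hnil
    exact h (by subst hnil; exact (PySem.Chars.startswith_iff _ _).2 List.nil_prefix)
  simpa [List.length_dropLast] using Nat.sub_lt (List.length_pos_of_ne_nil hp) one_pos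

-- A's _common_prefix
def pvCommonPrefixA (names : List (List Char)) : List Char :=
  match names with
  | [] => []
  | n0 :: rest => rest.foldl (fun p name => pvShrinkA p name) n0

-- float thresholds 'count > total * 0.5' / 'env_count > total * 0.3' are ported exactly as the
-- integer comparisons 2*count > total / 10*env_count > 3*total (equal comparisons for any feasible list length)
def infer_naming_pattern_py (names : List String) : String :=
  if names = [] then "unknown"
  else
    let total : Int := names.length
    let dash_count : Int := (names.map (fun n => if PySem.Str.isIn "-" n then (1 : Int) else 0)).sum
    let underscore_count : Int := (names.map (fun n => if PySem.Str.isIn "_" n then (1 : Int) else 0)).sum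
    let dot_count : Int := (names.map (fun n => if PySem.Str.isIn "." n then (1 : Int) else 0)).sum
    let env_count : Int := (names.map (fun n => if pvEnvSuffixes.any (fun s => PySem.Str.endswith (PySem.Str.lower n) s) then (1 : Int) else 0)).sum
    let patterns : List String := []
    let patterns := if 2 * dash_count > total then patterns ++ ["kebab-case"] else patterns
    let patterns := if 2 * underscore_count > total then patterns ++ ["snake_case"] else patterns
    let patterns := if 2 * dot_count > total then patterns ++ ["dot.separated"] else patterns
    let patterns := if 10 * env_count > 3 * total then patterns ++ ["env-suffixed"] else patterns
    let patterns :=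
      if 2 ≤ names.length then
        let pfx := pvCommonPrefixA (names.map String.toList)
        if 3 ≤ pfx.length then patterns ++ ["prefix: '" ++ String.mk pfx ++ "'"] else patterns
      else patterns
    if patterns = [] then "mixed" else PySem.Str.join ", " patterns

-- ===== PORT B =====
-- B's column walk over zip(*names): emit names[0]'s char while every other column entry matches
def pvColPrefix : List Char → List (List Char) → List Char
  | [], _ => []
  | c :: cs, rest =>
    if rest.all (fun l => l.head? == some c) then c :: pvColPrefix cs (rest.map List.tail)
    else []

def infer_naming_pattern_py_alt (names : List String) : String :=
  if names = [] then "unknown"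
  else
    let counts := names.foldl
      (fun (acc : Int × Int × Int × Int) n =>
        (acc.1 + (if PySem.Str.isIn "-" n then 1 else 0),
         acc.2.1 + (if PySem.Str.isIn "_" n then 1 else 0),
         acc.2.2.1 + (if PySem.Str.isIn "." n then 1 else 0),
         acc.2.2.2 + (if pvEnvSuffixes.any (fun s => PySem.Str.endswith (PySem.Str.lower n) s) then 1 else 0)))
      ((0 : Int), (0 : Int), (0 : Int), (0 : Int))
    let total : Int := names.length
    let patterns : List String := []
    let patterns := if 2 * counts.1 > total then patterns ++ ["kebab-case"] else patterns
    let patterns := if 2 * counts.2.1 > total then patterns ++ ["snake_case"] else patterns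
    let patterns := if 2 * counts.2.2.1 > total then patterns ++ ["dot.separated"] else patterns
    let patterns := if 10 * counts.2.2.2 > 3 * total then patterns ++ ["env-suffixed"] else patterns
    let patterns :=
      if 2 ≤ names.length then
        match names with
        | [] => patterns
        | n0 :: rest =>
          let pfx := pvColPrefix n0.toList (rest.map String.toList)
          if 3 ≤ pfx.length then patterns ++ ["prefix: '" ++ String.mk pfx ++ "'"] else patterns
      else patterns
    if patterns = [] then "mixed" else PySem.Str.join ", " patterns

-- ===== PRECONDITION & SPEC =====
def Spec_infer_naming_pattern_py (names : List String) (out : String) : Prop := out = infer_naming_pattern_py_alt names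
instance (names : List String) (out : String) : Decidable (Spec_infer_naming_pattern_py names out) := by unfold Spec_infer_naming_pattern_py; infer_instance

-- ===== CLAIM (what is proved, stated in full; the proofs are below) =====
def Claim_equal_infer_naming_pattern_py : Prop := ∀ (names : List String), Dom_infer_naming_pattern_py names → Spec_infer_naming_pattern_py names (infer_naming_pattern_py names)

-- ===== LEMMAS AND PROOFS =====

-- charwise common prefix of two strings: the value both prefix computations maintain
def pvCp2 : List Char → List Char → List Char
  | a :: as, b :: bs => if a = b then a :: pvCp2 as bs else []
  | _, _ => []

theorem pvCp2_nil_right (x : List Char) : pvCp2 x [] = [] := by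
  cases x <;> rfl

theorem pvCp2_of_prefix (p n : List Char) (h : p <+: n) : pvCp2 p n = p := by
  induction p generalizing n with
  | nil => cases n <;> rfl
  | cons a as ih =>
    obtain ⟨t, rfl⟩ := h
    simp [pvCp2, ih (as ++ t) (List.prefix_append as t)]

theorem pvCp2_dropLast (p n : List Char) (h : ¬ p <+: n) : pvCp2 p n = pvCp2 p.dropLast n := by
  induction p generalizing n with
  | nil => exact absurd List.nil_prefix h
  | cons a as ih =>
    cases n with
    | nil => rw [pvCp2_nil_right, pvCp2_nil_right]
    | cons b bs =>
      by_cases hab : a = b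
      · subst hab
        have has : as ≠ [] := by
          rintro rfl
          exact h (by simp)
        have h' : ¬ as <+: bs := fun hp => h (by simpa using hp)
        rw [List.dropLast_cons_of_ne_nil has]
        simp [pvCp2, ih bs h']
      · cases has : as with
        | nil => subst has; simp [pvCp2, hab]
        | cons a' as' =>
          rw [← has, List.dropLast_cons_of_ne_nil (by simp [has])]
          simp [pvCp2, hab]

theorem pvShrinkA_eq_cp2 (p name : List Char) : pvShrinkA p name = pvCp2 p name := by
  induction p using pvShrinkA.induct name with
  | case1 p h =>
    rw [pvShrinkA, dif_pos h]
    exact (pvCp2_of_prefix _ _ ((PySem.Chars.startswith_iff _ _).1 h)).symm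
  | case2 p h h2 =>
    rw [pvShrinkA, dif_neg h, dif_pos h2]
    have hnp : ¬ p <+: name := fun hp => h ((PySem.Chars.startswith_iff _ _).2 hp)
    rw [pvCp2_dropLast p name hnp, h2]
    cases name <;> rfl
  | case3 p h h2 ih =>
    rw [pvShrinkA, dif_neg h, dif_neg h2]
    have hnp : ¬ p <+: name := fun hp => h ((PySem.Chars.startswith_iff _ _).2 hp)
    rw [ih, pvCp2_dropLast p name hnp]

theorem pvColPrefix_nil (x : List Char) : pvColPrefix x [] = x := by
  induction x with
  | nil => rfl
  | cons c cs ih => simp [pvColPrefix, ih]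

theorem pvColPrefix_cons (x n : List Char) (rest : List (List Char)) :
    pvColPrefix x (n :: rest) = pvColPrefix (pvCp2 x n) rest := by
  induction x generalizing n rest with
  | nil => cases n <;> rfl
  | cons c cs ih =>
    cases n with
    | nil => simp [pvColPrefix, pvCp2_nil_right]
    | cons b bs =>
      by_cases hbc : b = c
      · subst hbc
        by_cases hall : rest.all (fun l => l.head? == some b) = true
        · simp [pvColPrefix, pvCp2, hall, ih]
        · simp [pvColPrefix, pvCp2, hall]
      · simp [pvColPrefix, pvCp2, hbc, Ne.symm hbc]

theorem pvFold_eq_col (rest : List (List Char)) (x : List Char) :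
    rest.foldl (fun p name => pvShrinkA p name) x = pvColPrefix x rest := by
  induction rest generalizing x with
  | nil => exact (pvColPrefix_nil x).symm
  | cons n rest ih =>
    rw [List.foldl_cons, pvShrinkA_eq_cp2, ih, pvColPrefix_cons]

theorem pvFold4 (names : List String) (a b c d : Int) :
    names.foldl
      (fun (acc : Int × Int × Int × Int) n =>
        (acc.1 + (if PySem.Str.isIn "-" n then 1 else 0),
         acc.2.1 + (if PySem.Str.isIn "_" n then 1 else 0),
         acc.2.2.1 + (if PySem.Str.isIn "." n then 1 else 0),
         acc.2.2.2 + (if pvEnvSuffixes.any (fun s => PySem.Str.endswith (PySem.Str.lower n) s) then 1 else 0)))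
      (a, b, c, d)
    = (a + (names.map (fun n => if PySem.Str.isIn "-" n then (1 : Int) else 0)).sum,
       b + (names.map (fun n => if PySem.Str.isIn "_" n then (1 : Int) else 0)).sum,
       c + (names.map (fun n => if PySem.Str.isIn "." n then (1 : Int) else 0)).sum,
       d + (names.map (fun n => if pvEnvSuffixes.any (fun s => PySem.Str.endswith (PySem.Str.lower n) s) then (1 : Int) else 0)).sum) := by
  induction names generalizing a b c d with
  | nil => simp
  | cons n t ih =>
    rw [List.foldl_cons, ih]
    simp only [List.map_cons, List.sum_cons, Prod.mk.injEq]
    refine ⟨by ring, by ring, by ring, by ring⟩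

-- ===== VERDICT (by name: the statement is the Claim_ definition above) =====
theorem infer_naming_pattern_py_spec : Claim_equal_infer_naming_pattern_py := by
  unfold Claim_equal_infer_naming_pattern_py
  intro names _
  unfold Spec_infer_naming_pattern_py infer_naming_pattern_py infer_naming_pattern_py_alt
  by_cases h : names = []
  · simp [h]
  · simp only [if_neg h]
    have hc := pvFold4 names 0 0 0 0
    simp only [zero_add] at hc
    rw [hc]
    cases names with
    | nil => exact absurd rfl h
    | cons n0 rest =>
      have hp : pvCommonPrefixA (n0.toList :: rest.map String.toList)
          = pvColPrefix n0.toList (rest.map String.toList) := by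
        simp [pvCommonPrefixA, pvFold_eq_col]
      simp [hp]
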